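-- pv_equiv track=rewrite | github.com/arius153/bioinformatika1 | main.py | find_stop_sart_sequences
-- ===== SOURCE A (Python) =====
-- stops = ["TAA", "TAG", "TGA"]
--
-- start = "ATG"
--
-- def find_stop_sart_sequences(codoneslist):
--     foundcodones = []
--     for idx, codone in enumerate(codoneslist):
--         if codone in stops:
--             startPos = 0
--             for idx2, codone2 in enumerate(codoneslist[idx + 1:]):
--                 if codone2 == start:
--                     startPos = idx + idx2 + 1
--                 if codone2 in stops:
--                     if startPos > 0:
--                         foundcodones.append(codoneslist[idx:startPos + 1])
--                         break
--                     else: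
--                         break
--     return foundcodones
-- ===== SOURCE B (Python) =====
-- stops = ["TAA", "TAG", "TGA"]
--
-- start = "ATG"
--
-- def find_stop_sart_sequences(codoneslist):
--     # One pass: remember the previous stop and the last start seen since it;
--     # emit the pending slice whenever the next stop is reached.
--     result = []
--     last_stop = None
--     last_start = None
--     for i, c in enumerate(codoneslist):
--         if c in stops:
--             if last_stop is not None and last_start is not None:
--                 result.append(codoneslist[last_stop:last_start + 1])
--             last_stop = i
--             last_start = None
--         elif c == start:
--             last_start = i
--     return result
-- ===== Notes on version B (the rewrite author's own statement) =====
-- stated objective: alternative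
-- what changed: Replaces the nested forward rescan after every stop codon with a single pass that tracks the previous stop and the last start seen since it, emitting the pending slice at each new stop.
import Mathlib
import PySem

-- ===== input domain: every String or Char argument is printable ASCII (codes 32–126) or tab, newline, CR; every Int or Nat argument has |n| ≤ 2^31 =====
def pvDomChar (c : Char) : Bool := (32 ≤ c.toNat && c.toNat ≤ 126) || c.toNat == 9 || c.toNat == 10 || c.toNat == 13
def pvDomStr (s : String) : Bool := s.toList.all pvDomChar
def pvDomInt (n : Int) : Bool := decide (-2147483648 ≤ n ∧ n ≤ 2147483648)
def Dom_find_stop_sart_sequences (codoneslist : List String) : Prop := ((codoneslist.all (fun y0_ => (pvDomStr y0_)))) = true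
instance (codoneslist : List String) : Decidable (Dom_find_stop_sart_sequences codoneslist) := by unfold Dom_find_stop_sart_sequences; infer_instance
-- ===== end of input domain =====

-- B replaces A's nested forward rescans with a single pass that tracks the previous
-- stop and the last start codon seen since it (a different, one-pass algorithm).


def pvStops : List String := ["TAA", "TAG", "TGA"]

def pvStart : String := "ATG"

-- ===== PORT A =====
-- Inner loop of A: scans codoneslist[idx+1:] (passed as the list argument) with
-- running index idx2 and accumulator startPos; `break` after append → `some slice`,
-- bare `break` → `none`.  The slice codoneslist[idx:startPos+1] has 0 ≤ idx < startPos+1,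
-- where Python slicing is exactly drop/take.
def pvInnerA (full : List String) (idx : Nat) : List String → Nat → Nat → Option (List String)
  | [], _, _ => none
  | c :: rest, idx2, startPos =>
    let sp := if c = pvStart then idx + idx2 + 1 else startPos
    if c ∈ pvStops then
      if sp > 0 then some ((full.drop idx).take (sp + 1 - idx)) else none
    else pvInnerA full idx rest (idx2 + 1) sp

-- Outer loop of A over enumerate(codoneslist); appends the inner loop's find (if any).
def pvOuterA (full : List String) : Nat → List String → List (List String)
  | _, [] => []
  | idx, c :: rest =>
    (if c ∈ pvStops then
      (match pvInnerA full idx (full.drop (idx + 1)) 0 0 with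
       | some s => [s]
       | none => []) else []) ++ pvOuterA full (idx + 1) rest

def find_stop_sart_sequences (codoneslist : List String) : List (List String) :=
  pvOuterA codoneslist 0 codoneslist

-- ===== PORT B =====
-- Single pass: lastStop / lastStart are the pending previous stop index and the last
-- start index seen since it; at each stop emit codoneslist[lastStop:lastStart+1]
-- (`if last_stop is not None and last_start is not None: result.append(...)`).
def pvPendingB (full : List String) : Option Nat → Option Nat → List (List String)
  | some a, some p => [(full.drop a).take (p + 1 - a)]
  | _, _ => []

def pvGoB (full : List String) : Nat → Option Nat → Option Nat → List String → List (List String)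
  | _, _, _, [] => []
  | i, lastStop, lastStart, c :: rest =>
    if c ∈ pvStops then
      pvPendingB full lastStop lastStart ++ pvGoB full (i + 1) (some i) none rest
    else if c = pvStart then pvGoB full (i + 1) lastStop (some i) rest
    else pvGoB full (i + 1) lastStop lastStart rest

def find_stop_sart_sequences_alt (codoneslist : List String) : List (List String) :=
  pvGoB codoneslist 0 none none codoneslist

-- ===== PRECONDITION & SPEC =====
def Spec_find_stop_sart_sequences (codoneslist : List String) (out : List (List String)) : Prop := out = find_stop_sart_sequences_alt codoneslist
instance (codoneslist : List String) (out : List (List String)) : Decidable (Spec_find_stop_sart_sequences codoneslist out) := by unfold Spec_find_stop_sart_sequences; infer_instance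

-- ===== CLAIM (what is proved, stated in full; the proofs are below) =====
def Claim_equal_find_stop_sart_sequences : Prop := ∀ (codoneslist : List String), Dom_find_stop_sart_sequences codoneslist → Spec_find_stop_sart_sequences codoneslist (find_stop_sart_sequences codoneslist)

-- ===== LEMMAS AND PROOFS =====

theorem pvPendingB_none {full : List String} (ls : Option Nat) : pvPendingB full none ls = [] := by
  cases ls <;> rfl

theorem pvPendingB_some_none {full : List String} (a : Nat) : pvPendingB full (some a) none = [] := rfl

theorem pvPendingB_some_some {full : List String} (a p : Nat) :
    pvPendingB full (some a) (some p) = [(full.drop a).take (p + 1 - a)] := rfl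

-- B's state with a pending stop a equals A's inner scan for a (from position i, with
-- startPos encoding the last start seen so far) followed by A's outer loop from i.
theorem pvGoB_pending (full : List String) :
    ∀ (rest : List String) (i a sp : Nat) (lastStart : Option Nat),
      full.drop i = rest → a < i →
      ((lastStart = none ∧ sp = 0) ∨ (∃ p, lastStart = some p ∧ sp = p ∧ a < p ∧ p < i)) →
      pvGoB full i (some a) lastStart rest =
        (pvInnerA full a rest (i - a - 1) sp).toList ++ pvOuterA full i rest := by
  intro rest
  induction rest with
  | nil => intro i a sp lastStart _ _ _; simp [pvGoB, pvInnerA, pvOuterA]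
  | cons c rest ih =>
    intro i a sp lastStart hdrop ha hinv
    have hdrop' : full.drop (i + 1) = rest := by
      rw [← List.tail_drop, hdrop]; rfl
    have h0 : i + 1 - i - 1 = 0 := by omega
    have h2 : i + 1 - a - 1 = (i - a - 1) + 1 := by omega
    by_cases hstop : c ∈ pvStops
    · have hcs : c ≠ pvStart := fun h => absurd (h ▸ hstop) (by decide)
      rw [pvGoB, pvInnerA, pvOuterA]
      simp only [if_pos hstop, if_neg hcs]
      rw [ih (i + 1) i 0 none hdrop' (by omega) (Or.inl ⟨rfl, rfl⟩), h0, hdrop']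
      rcases hinv with ⟨hls, hsp⟩ | ⟨p, hls, hsp, hap, hpi⟩
      · subst hls; subst hsp
        rw [pvPendingB_some_none]
        cases pvInnerA full i rest 0 0 <;> simp
      · subst hls; subst hsp
        have hp0 : 0 < sp := by omega
        rw [pvPendingB_some_some, if_pos hp0]
        cases pvInnerA full i rest 0 0 <;> simp
    · by_cases hcst : c = pvStart
      · rw [pvGoB, pvInnerA, pvOuterA]
        simp only [if_neg hstop, if_pos hcst]
        rw [ih (i + 1) a (a + (i - a - 1) + 1) (some i) hdrop' (by omega)
            (Or.inr ⟨i, rfl, by omega, ha, by omega⟩)]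
        have h1 : a + (i - a - 1) + 1 = i := by omega
        rw [h1, h2]; simp
      · rw [pvGoB, pvInnerA, pvOuterA]
        simp only [if_neg hstop, if_neg hcst]
        rw [ih (i + 1) a sp lastStart hdrop' (by omega)
            (by rcases hinv with h | ⟨p, h1', h2', h3, h4⟩
                · exact Or.inl h
                · exact Or.inr ⟨p, h1', h2', h3, by omega⟩), h2]
        simp

-- With no pending stop, B's pass is exactly A's outer loop.
theorem pvGoB_none (full : List String) :
    ∀ (rest : List String) (i : Nat) (lastStart : Option Nat),
      full.drop i = rest →
      pvGoB full i none lastStart rest = pvOuterA full i rest := by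
  intro rest
  induction rest with
  | nil => intro i lastStart _; simp [pvGoB, pvOuterA]
  | cons c rest ih =>
    intro i lastStart hdrop
    have hdrop' : full.drop (i + 1) = rest := by
      rw [← List.tail_drop, hdrop]; rfl
    by_cases hstop : c ∈ pvStops
    · rw [pvGoB, pvOuterA]
      simp only [if_pos hstop]
      rw [pvGoB_pending full rest (i + 1) i 0 none hdrop' (by omega) (Or.inl ⟨rfl, rfl⟩)]
      have h0 : i + 1 - i - 1 = 0 := by omega
      rw [h0, hdrop', pvPendingB_none]
      cases pvInnerA full i rest 0 0 <;> simp
    · by_cases hcst : c = pvStart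
      · rw [pvGoB, pvOuterA]
        simp only [if_neg hstop, if_pos hcst]
        exact ih (i + 1) (some i) hdrop'
      · rw [pvGoB, pvOuterA]
        simp only [if_neg hstop, if_neg hcst]
        exact ih (i + 1) lastStart hdrop'

-- ===== VERDICT (by name: the statement is the Claim_ definition above) =====
theorem find_stop_sart_sequences_spec : Claim_equal_find_stop_sart_sequences := by
  intro codoneslist _
  unfold Spec_find_stop_sart_sequences find_stop_sart_sequences find_stop_sart_sequences_alt
  exact (pvGoB_none codoneslist codoneslist 0 none (by simp)).symm
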